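-- pv_equiv track=rewrite | github.com/jymoon0613/codingtest | baekjoon/백준-1802.py | check
-- ===== SOURCE A (Python) =====
-- def check(array):
--
--     while len(array) >= 3:
--         for i in range(0, len(array)-2, 2):
--             if array[i] == array[i+2]:
--                 return False
--
--         array_ = []
--         for i in range(1, len(array), 2):
--             array_.append(array[i])
--
--         array = array_
--
--     return True
-- ===== SOURCE B (Python) =====
-- def check(array):
--     n = len(array)
--     start, step = 0, 1
--     while start + 2 * step < n:
--         p = start
--         while p + 2 * step < n:
--             if array[p] == array[p + 2 * step]:
--                 return False
--             p += 2 * step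
--         start += step
--         step *= 2
--     return True
-- ===== Notes on version B (the rewrite author's own statement) =====
-- stated objective: alternative
-- what changed: B never materializes the halved subarrays: it keeps the original list and threads (start, step) indices (start += step, step *= 2), scanning virtual views in place, where A rebuilds a new list at every halving round.
import Mathlib
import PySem

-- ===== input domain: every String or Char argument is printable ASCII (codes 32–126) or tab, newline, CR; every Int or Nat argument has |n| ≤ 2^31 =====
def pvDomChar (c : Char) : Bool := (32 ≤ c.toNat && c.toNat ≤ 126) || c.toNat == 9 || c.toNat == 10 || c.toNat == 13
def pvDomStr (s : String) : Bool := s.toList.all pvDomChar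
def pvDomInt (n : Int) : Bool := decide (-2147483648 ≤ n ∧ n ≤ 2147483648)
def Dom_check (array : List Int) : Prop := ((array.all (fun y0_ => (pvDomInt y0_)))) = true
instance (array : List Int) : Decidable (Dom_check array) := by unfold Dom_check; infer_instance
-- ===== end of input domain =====

-- B replaces A's rebuild-the-halved-list loop by (start, step) index threading over the
-- one original list (virtual views, O(1) extra space); same return value on every input.


-- ===== PORT A =====
def check (array : List Int) : Bool :=
  if 3 ≤ array.length then
    if (PySem.List.pyRange 0 ((array.length : Int) - 2) 2).any
        (fun i => PySem.List.pyGetD array i 0 == PySem.List.pyGetD array (i + 2) 0) then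
      false
    else
      check ((PySem.List.pyRange 1 (array.length : Int) 2).map
        (fun i => PySem.List.pyGetD array i 0))
  else
    true
termination_by array.length
decreasing_by
  rename_i h _hne
  rw [List.length_map, PySem.List.pyRange_of_pos 1 ((array.length : Int)) (of_decide_eq_true rfl),
    List.length_map, List.length_range,
    if_pos (lt_of_lt_of_le (of_decide_eq_true rfl : (1:Int) < 3) (Int.ofNat_le.mpr h))]
  have e : ((array.length : Int)) - 1 + 2 - 1 = ((array.length : Int)) := by ring
  rw [e, ← PySem.Int.floordiv_eq_ediv_of_pos (of_decide_eq_true rfl : (0:Int) < 2),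
    show PySem.Int.floordiv ((array.length : Int)) 2 = ((array.length / 2 : Nat) : Int) from
      PySem.Int.floordiv_natCast array.length 2,
    Int.toNat_natCast]
  exact Nat.div_lt_self (Nat.lt_of_lt_of_le (Nat.succ_pos 2) h) (Nat.lt_succ_self 1)

-- ===== PORT B =====
-- inner while loop: scan positions p, p+2*step, … of the current virtual view
def altFind (a : List Int) (n st : Nat) (hs : 0 < st) (p : Nat) : Bool :=
  if p + 2 * st < n then
    if a.getD p 0 == a.getD (p + 2 * st) 0 then true
    else altFind a n st hs (p + 2 * st)
  else false
termination_by n - p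
decreasing_by
  rename_i h _hne
  exact Nat.sub_lt_sub_left (Nat.lt_of_le_of_lt (Nat.le_add_right p (2 * st)) h)
    (Nat.lt_add_of_pos_right (Nat.mul_pos (Nat.succ_pos 1) hs))

-- outer while loop: start += step, step *= 2
def altLoop (a : List Int) (n start st : Nat) (hs : 0 < st) : Bool :=
  if start + 2 * st < n then
    if altFind a n st hs start then false
    else altLoop a n (start + st) (2 * st) (Nat.mul_pos (Nat.succ_pos 1) hs)
  else true
termination_by n - start
decreasing_by
  rename_i h _hne
  exact Nat.sub_lt_sub_left (Nat.lt_of_le_of_lt (Nat.le_add_right start (2 * st)) h)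
    (Nat.lt_add_of_pos_right hs)

def check_alt (array : List Int) : Bool :=
  altLoop array array.length 0 1 Nat.one_pos

-- ===== PRECONDITION & SPEC =====
def Spec_check (array : List Int) (out : Bool) : Prop := out = check_alt array
instance (array : List Int) (out : Bool) : Decidable (Spec_check array out) := by unfold Spec_check; infer_instance

-- ===== CLAIM (what is proved, stated in full; the proofs are below) =====
def Claim_equal_check : Prop := ∀ (array : List Int), Dom_check array → Spec_check array (check array)

-- ===== LEMMAS AND PROOFS =====

-- the virtual view a[s::st] as a list (proof-side helper)
def view (a : List Int) (s st : Nat) : List Int :=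
  if _h : s < a.length ∧ 0 < st then a.getD s 0 :: view a (s + st) st else []
termination_by a.length - s
decreasing_by exact Nat.sub_lt_sub_left _h.1 (Nat.lt_add_of_pos_right _h.2)

theorem view_getElem? (a : List Int) (st : Nat) (hs : 0 < st) :
    ∀ (j s : Nat), (view a s st)[j]? = if s + j * st < a.length then some (a.getD (s + j * st) 0) else none := by
  intro j
  induction j with
  | zero =>
    intro s
    rw [view]
    by_cases h : s < a.length
    · simp [h, hs]
    · have h0 : ¬ (s + 0 * st < a.length) := by omega
      simp [h]
  | succ j ih =>
    intro s
    rw [view]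
    by_cases h : s < a.length
    · simp only [h, hs, and_true, dif_pos, List.getElem?_cons_succ]
      rw [ih (s + st)]
      have he : s + st + j * st = s + (j + 1) * st := by ring
      rw [he]
    · have h2 : ¬ (s + (j + 1) * st < a.length) := by
        have : s ≤ s + (j + 1) * st := Nat.le_add_right _ _
        omega
      simp [h, h2]

theorem lt_view_length (a : List Int) (s st : Nat) (hs : 0 < st) (j : Nat) :
    j < (view a s st).length ↔ s + j * st < a.length := by
  have h := view_getElem? a st hs j s
  constructor
  · intro hj
    by_contra hc
    rw [if_neg hc, List.getElem?_eq_getElem hj] at h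
    simp at h
  · intro hin
    by_contra hc
    rw [if_pos hin, List.getElem?_eq_none (by omega)] at h
    simp at h

theorem view_getD (a : List Int) (s st : Nat) (hs : 0 < st) (j : Nat)
    (h : s + j * st < a.length) :
    (view a s st).getD j 0 = a.getD (s + j * st) 0 := by
  rw [List.getD_eq_getElem?_getD, view_getElem? a st hs j s, if_pos h]
  rfl

-- characterization of B's inner scan
theorem altFind_spec (a : List Int) (n st : Nat) (hs : 0 < st) :
    ∀ (p : Nat), (altFind a n st hs p = true ↔
      ∃ m : Nat, p + (2 * m + 2) * st < n ∧ a.getD (p + 2 * m * st) 0 = a.getD (p + (2 * m + 2) * st) 0) := by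
  have key : ∀ (μ p : Nat), n - p ≤ μ → (altFind a n st hs p = true ↔
      ∃ m : Nat, p + (2 * m + 2) * st < n ∧ a.getD (p + 2 * m * st) 0 = a.getD (p + (2 * m + 2) * st) 0) := by
    intro μ
    induction μ with
    | zero =>
      intro p hp
      rw [altFind]
      have h : ¬ (p + 2 * st < n) := by omega
      simp only [h, if_false, Bool.false_eq_true, false_iff]
      rintro ⟨m, hm, _⟩
      have : 2 * st ≤ (2 * m + 2) * st := Nat.mul_le_mul_right st (by omega)
      omega
    | succ μ ih =>
      intro p hp
      rw [altFind]
      by_cases h : p + 2 * st < n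
      · simp only [h, if_true]
        by_cases he : a.getD p 0 = a.getD (p + 2 * st) 0
        · have hb : (a.getD p 0 == a.getD (p + 2 * st) 0) = true := beq_iff_eq.mpr he
          simp only [hb, if_true, true_iff]
          refine ⟨0, by omega, ?_⟩
          have h1 : p + 2 * 0 * st = p := by ring
          have h2 : p + (2 * 0 + 2) * st = p + 2 * st := by ring
          rw [h1, h2]; exact he
        · have hb : (a.getD p 0 == a.getD (p + 2 * st) 0) = false := beq_eq_false_iff_ne.mpr he
          simp only [hb, Bool.false_eq_true, if_false]
          rw [ih (p + 2 * st) (by omega)]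
          constructor
          · rintro ⟨m, hm, hv⟩
            refine ⟨m + 1, ?_, ?_⟩
            · have : p + 2 * st + (2 * m + 2) * st = p + (2 * (m + 1) + 2) * st := by ring
              omega
            · have e1 : p + 2 * st + 2 * m * st = p + 2 * (m + 1) * st := by ring
              have e2 : p + 2 * st + (2 * m + 2) * st = p + (2 * (m + 1) + 2) * st := by ring
              rw [e1, e2] at hv; exact hv
          · rintro ⟨m, hm, hv⟩
            match m with
            | 0 =>
              exfalso
              have h1 : p + 2 * 0 * st = p := by ring
              have h2 : p + (2 * 0 + 2) * st = p + 2 * st := by ring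
              rw [h1, h2] at hv; exact he hv
            | m + 1 =>
              refine ⟨m, ?_, ?_⟩
              · have : p + 2 * st + (2 * m + 2) * st = p + (2 * (m + 1) + 2) * st := by ring
                omega
              · have e1 : p + 2 * st + 2 * m * st = p + 2 * (m + 1) * st := by ring
                have e2 : p + 2 * st + (2 * m + 2) * st = p + (2 * (m + 1) + 2) * st := by ring
                rw [e1, e2]; exact hv
      · simp only [h, if_false, Bool.false_eq_true, false_iff]
        rintro ⟨m, hm, _⟩
        have : 2 * st ≤ (2 * m + 2) * st := Nat.mul_le_mul_right st (by omega)
        omega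
  intro p
  exact key (n - p) p le_rfl

-- A's inner for-loop (the 'any' over range(0, len-2, 2)) on a view = B's inner scan
theorem anyA_eq_altFind (a : List Int) (s st : Nat) (hs : 0 < st)
    (h3 : 3 ≤ (view a s st).length) :
    ((PySem.List.pyRange 0 (((view a s st).length : Int) - 2) 2).any
      (fun i => PySem.List.pyGetD (view a s st) i 0 == PySem.List.pyGetD (view a s st) (i + 2) 0))
    = altFind a a.length st hs s := by
  set v := view a s st with hv
  have hL : ∀ j : Nat, j < v.length ↔ s + j * st < a.length := fun j => lt_view_length a s st hs j
  rw [Bool.eq_iff_iff, List.any_eq_true, altFind_spec a a.length st hs s]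
  rw [PySem.List.pyRange_of_pos 0 ((v.length : Int) - 2) (by omega)]
  constructor
  · rintro ⟨i, hi, hP⟩
    simp only [List.mem_map, List.mem_range] at hi
    obtain ⟨k, hk, rfl⟩ := hi
    have hklen : 2 * k + 2 < v.length := by
      rcases lt_or_ge (0 : Int) ((v.length : Int) - 2) with hpos | hneg
      · rw [if_pos hpos] at hk; omega
      · rw [if_neg (by omega)] at hk; omega
    have hc : (0 + 2 * (k : Int)) = ((2 * k : Nat) : Int) := by push_cast; ring
    have hc2 : (((2 * k : Nat) : Int) + 2) = ((2 * k + 2 : Nat) : Int) := by push_cast; ring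
    rw [hc, hc2, PySem.List.pyGetD_natCast, PySem.List.pyGetD_natCast, beq_iff_eq] at hP
    refine ⟨k, ?_, ?_⟩
    · have := (hL (2 * k + 2)).mp hklen
      have e : s + (2 * k + 2) * st = s + (2 * k + 2) * st := rfl
      omega
    · have hin1 : s + (2 * k) * st < a.length := (hL (2 * k)).mp (by omega)
      have hin2 : s + (2 * k + 2) * st < a.length := (hL (2 * k + 2)).mp hklen
      have g1 := view_getD a s st hs (2 * k) hin1
      have g2 := view_getD a s st hs (2 * k + 2) hin2
      rw [← hv] at g1 g2
      rw [g1, g2] at hP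
      have e1 : s + 2 * k * st = s + (2 * k) * st := by ring
      rw [e1]; exact hP
  · rintro ⟨m, hm, hv2⟩
    have hmlen : 2 * m + 2 < v.length := by
      rw [hL (2 * m + 2)]
      have e : (2 * m + 2) * st = (2 * m + 2) * st := rfl
      omega
    refine ⟨(0 : Int) + 2 * (m : Int), ?_, ?_⟩
    · simp only [List.mem_map, List.mem_range]
      refine ⟨m, ?_, rfl⟩
      have hLv : 3 ≤ v.length := h3
      have hpos : (0 : Int) < (v.length : Int) - 2 := by exact_mod_cast (by omega : (0:Int) < (v.length:Int) - 2)
      rw [if_pos hpos]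
      omega
    · have hc : (0 + 2 * (m : Int)) = ((2 * m : Nat) : Int) := by push_cast; ring
      have hc2 : (((2 * m : Nat) : Int) + 2) = ((2 * m + 2 : Nat) : Int) := by push_cast; ring
      rw [hc, hc2, PySem.List.pyGetD_natCast, PySem.List.pyGetD_natCast, beq_iff_eq]
      have hin1 : s + (2 * m) * st < a.length := (hL (2 * m)).mp (by omega)
      have hin2 : s + (2 * m + 2) * st < a.length := (hL (2 * m + 2)).mp hmlen
      have g1 := view_getD a s st hs (2 * m) hin1
      have g2 := view_getD a s st hs (2 * m + 2) hin2
      rw [← hv] at g1 g2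
      rw [g1, g2]
      have e1 : s + 2 * m * st = s + (2 * m) * st := by ring
      rw [← e1]; exact hv2

-- A's rebuilt list on a view is the next (doubled-step) view
theorem rebuild_eq_view (a : List Int) (s st : Nat) (hs : 0 < st) :
    ((PySem.List.pyRange 1 ((view a s st).length : Int) 2).map
      (fun i => PySem.List.pyGetD (view a s st) i 0))
    = view a (s + st) (2 * st) := by
  set v := view a s st with hv
  apply List.ext_getElem?
  intro k
  rw [view_getElem? a (2 * st) (by omega) k (s + st)]
  rw [PySem.List.pyRange_of_pos 1 ((v.length : Int)) (by omega), List.map_map]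
  rw [List.getElem?_map]
  have hrange : (List.range (if (1:Int) < (v.length : Int) then (((v.length : Int) - 1 + 2 - 1) / 2).toNat else 0))[k]? =
      if k < (if (1:Int) < (v.length : Int) then (((v.length : Int) - 1 + 2 - 1) / 2).toNat else 0) then some k else none := by
    by_cases hkr : k < (if (1:Int) < (v.length : Int) then (((v.length : Int) - 1 + 2 - 1) / 2).toNat else 0)
    · rw [if_pos hkr, List.getElem?_range hkr]
    · rw [if_neg hkr, List.getElem?_eq_none (by rw [List.length_range]; omega)]
  rw [hrange]
  have hL : ∀ j : Nat, j < v.length ↔ s + j * st < a.length := fun j => lt_view_length a s st hs j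
  by_cases hk : 2 * k + 1 < v.length
  · have hkK : k < (if (1:Int) < (v.length : Int) then (((v.length : Int) - 1 + 2 - 1) / 2).toNat else 0) := by
      rw [if_pos (by exact_mod_cast (by omega : (1:Int) < (v.length : Int)))]
      omega
    rw [if_pos hkK]
    have hin : s + (2 * k + 1) * st < a.length := (hL (2 * k + 1)).mp hk
    have hcond : s + st + k * (2 * st) < a.length := by
      have e : s + st + k * (2 * st) = s + (2 * k + 1) * st := by ring
      omega
    rw [if_pos hcond]
    simp only [Option.map_some, Function.comp_apply]
    have hc : ((1 : Int) + 2 * (k : Int)) = ((2 * k + 1 : Nat) : Int) := by push_cast; ring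
    rw [hc, PySem.List.pyGetD_natCast]
    have g := view_getD a s st hs (2 * k + 1) hin
    rw [← hv] at g
    rw [g]
    have e : s + st + k * (2 * st) = s + (2 * k + 1) * st := by ring
    rw [e]
  · have hkK : ¬ k < (if (1:Int) < (v.length : Int) then (((v.length : Int) - 1 + 2 - 1) / 2).toNat else 0) := by
      split_ifs with hpos
      · omega
      · omega
    rw [if_neg hkK]
    have hcond : ¬ (s + st + k * (2 * st) < a.length) := by
      have e : s + st + k * (2 * st) = s + (2 * k + 1) * st := by ring
      have := (hL (2 * k + 1)).mpr
      intro hc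
      exact hk (this (by omega))
    rw [if_neg hcond]
    rfl

-- main invariant: A on the materialized view = B's index-threaded loop
theorem main_view (a : List Int) :
    ∀ (μ s st : Nat) (hs : 0 < st), a.length - s ≤ μ →
      check (view a s st) = altLoop a a.length s st hs := by
  intro μ
  induction μ with
  | zero =>
    intro s st hs hμ
    rw [check, altLoop]
    have h2 : ¬ (s + 2 * st < a.length) := by omega
    have h3 : ¬ (3 ≤ (view a s st).length) := by
      intro h
      exact h2 ((lt_view_length a s st hs 2).mp (by omega))
    simp [h2, h3]
  | succ μ ih =>
    intro s st hs hμ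
    rw [check, altLoop]
    by_cases h : s + 2 * st < a.length
    · have h3 : 3 ≤ (view a s st).length := by
        have := (lt_view_length a s st hs 2).mpr (by omega)
        omega
      rw [if_pos h3, if_pos h]
      rw [anyA_eq_altFind a s st hs h3]
      by_cases hf : altFind a a.length st hs s
      · rw [hf]; simp
      · simp only [Bool.not_eq_true] at hf
        rw [hf]
        simp only [Bool.false_eq_true, if_false]
        rw [rebuild_eq_view a s st hs]
        exact ih (s + st) (2 * st) (by omega) (by omega)
    · have h3 : ¬ (3 ≤ (view a s st).length) := by
        intro hc
        exact h ((lt_view_length a s st hs 2).mp (by omega))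
      simp [h, h3]

theorem view_zero_one (a : List Int) : view a 0 1 = a := by
  suffices h : ∀ (μ s : Nat), a.length - s ≤ μ → view a s 1 = a.drop s by
    simpa using h a.length 0 (by omega)
  intro μ
  induction μ with
  | zero =>
    intro s hμ
    rw [view]
    have h : ¬ (s < a.length ∧ 0 < 1) := by omega
    rw [dif_neg h, List.drop_eq_nil_of_le (by omega)]
  | succ μ ih =>
    intro s hμ
    rw [view]
    by_cases h : s < a.length
    · rw [dif_pos ⟨h, by omega⟩, ih (s + 1) (by omega), List.drop_eq_getElem_cons h]
      congr 1
      rw [List.getD_eq_getElem?_getD, List.getElem?_eq_getElem h]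
      rfl
    · rw [dif_neg (by omega), List.drop_eq_nil_of_le (by omega)]

-- ===== VERDICT (by name: the statement is the Claim_ definition above) =====
theorem check_spec : Claim_equal_check := by
  intro array _
  unfold Spec_check check_alt
  have h := main_view array array.length 0 1 (by omega) (by omega)
  rw [view_zero_one] at h
  exact h
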